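-- pv_equiv track=rewrite | github.com/D-X-Y/AutoDL-Projects | exps/NAS-Bench-201/xshape-collect.py | traverse_net
-- ===== SOURCE A (Python) =====
-- from typing import Dict, Any, Text, List
--
-- def traverse_net(candidates: List[int], N: int):
--   nets = ['']
--   for i in range(N):
--     new_nets = []
--     for net in nets:
--       for C in candidates:
--         new_nets.append(str(C) if net == '' else "{:}:{:}".format(net,C))
--     nets = new_nets
--   return nets
-- ===== SOURCE B (Python) =====
-- def traverse_net(candidates, N):
--   # Enumerate complete length-N tuples over candidates (last coordinate
--   # varies fastest, like the incremental loop), then format each once.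
--   def tuples(n):
--     if n <= 0:
--       return [()]
--     return [prefix + (c,) for prefix in tuples(n - 1) for c in candidates]
--   return [':'.join(str(c) for c in t) for t in tuples(N)]
-- ===== Notes on version B (the rewrite author's own statement) =====
-- stated objective: idiomatic
-- what changed: B enumerates the cartesian product as complete tuples (recursively, itertools.product order) and formats each tuple once with ':'.join, instead of A's pass-by-pass rebuilding of partial strings with a per-step empty-string check.
import Mathlib
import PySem

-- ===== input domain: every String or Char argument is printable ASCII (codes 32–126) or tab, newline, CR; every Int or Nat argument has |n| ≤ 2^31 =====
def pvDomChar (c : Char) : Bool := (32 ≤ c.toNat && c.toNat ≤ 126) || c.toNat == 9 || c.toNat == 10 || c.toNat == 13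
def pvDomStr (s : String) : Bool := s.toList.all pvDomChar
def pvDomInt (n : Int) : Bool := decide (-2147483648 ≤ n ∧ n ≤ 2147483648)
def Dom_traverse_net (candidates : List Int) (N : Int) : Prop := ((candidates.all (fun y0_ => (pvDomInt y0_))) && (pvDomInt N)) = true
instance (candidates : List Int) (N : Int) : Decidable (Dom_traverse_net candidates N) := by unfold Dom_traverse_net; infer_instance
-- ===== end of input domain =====

-- B enumerates complete tuples of the cartesian product and formats each once with ':'.join,
-- replacing A's pass-by-pass rebuilding of partial strings (idiomatic decomposition, same cost).


-- ===== PORT A =====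
def traverse_net (candidates : List Int) (N : Int) : List String :=
  (PySem.List.pyRange 0 N 1).foldl
    (fun nets _i =>
      nets.foldl
        (fun new_nets net =>
          candidates.foldl
            (fun acc C =>
              acc ++ [if net == "" then PySem.Int.toStr C else net ++ ":" ++ PySem.Int.toStr C])
            new_nets)
        [])
    [""]

-- ===== PORT B =====
-- tuples(n) of Source B: all length-n tuples over candidates, last coordinate fastest
def pvTuples (candidates : List Int) : Nat → List (List Int)
  | 0 => [[]]
  | n + 1 => (pvTuples candidates n).flatMap (fun p => candidates.map (fun c => p ++ [c]))

def traverse_net_alt (candidates : List Int) (N : Int) : List String :=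
  (pvTuples candidates N.toNat).map (fun t => PySem.Str.join ":" (t.map PySem.Int.toStr))

-- ===== PRECONDITION & SPEC =====
def Spec_traverse_net (candidates : List Int) (N : Int) (out : List String) : Prop := out = traverse_net_alt candidates N
instance (candidates : List Int) (N : Int) (out : List String) : Decidable (Spec_traverse_net candidates N out) := by unfold Spec_traverse_net; infer_instance

-- ===== CLAIM (what is proved, stated in full; the proofs are below) =====
def Claim_equal_traverse_net : Prop := ∀ (candidates : List Int) (N : Int), Dom_traverse_net candidates N → Spec_traverse_net candidates N (traverse_net candidates N)

-- ===== LEMMAS AND PROOFS =====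

-- str(C) joined for one tuple
def pvJoin (t : List Int) : String := PySem.Str.join ":" (t.map PySem.Int.toStr)

-- Nat.toDigitsCore only conses onto its accumulator
lemma pvToDigitsCore_acc_le (b : Nat) : ∀ (f n : Nat) (acc : List Char),
    acc.length ≤ (Nat.toDigitsCore b f n acc).length := by
  intro f
  induction f with
  | zero => intro n acc; simp [Nat.toDigitsCore]
  | succ f ih =>
      intro n acc
      simp only [Nat.toDigitsCore]
      split
      · simp
      · exact le_trans (by simp) (ih _ ((n % b).digitChar :: acc))

lemma pvToChars_ne_nil (n : Int) : PySem.Int.toChars n ≠ [] := by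
  unfold PySem.Int.toChars
  split
  · simp
  · intro h
    have h1 : (1 : Nat) ≤ (Nat.toDigits 10 n.toNat).length := by
      unfold Nat.toDigits
      simp only [Nat.toDigitsCore]
      split
      · simp
      · exact le_trans (by simp) (pvToDigitsCore_acc_le 10 _ _ _)
    rw [h] at h1; simp at h1

lemma pvJoin_cons_ne_nil (sep : List Char) (x : Int) (rest : List (List Char)) :
    PySem.Chars.join sep (PySem.Int.toChars x :: rest) ≠ [] := by
  cases rest with
  | nil => rw [PySem.Chars.join_singleton]; exact pvToChars_ne_nil x
  | cons y ys =>
      rw [PySem.Chars.join_cons_cons]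
      intro h
      rcases List.append_eq_nil_iff.mp h with ⟨h1, -⟩
      rcases List.append_eq_nil_iff.mp h1 with ⟨h2, -⟩
      exact pvToChars_ne_nil x h2

lemma pvChars_join_append_singleton (sep y : List Char) :
    ∀ (l : List (List Char)), l ≠ [] →
      PySem.Chars.join sep (l ++ [y]) = PySem.Chars.join sep l ++ sep ++ y := by
  intro l
  induction l with
  | nil => intro h; exact absurd rfl h
  | cons a rest ih =>
      intro _
      cases rest with
      | nil => simp [PySem.Chars.join_cons_cons, PySem.Chars.join_singleton]
      | cons b bs =>
          have ih' := ih (by simp)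
          simp only [List.cons_append] at ih' ⊢
          rw [PySem.Chars.join_cons_cons, ih', PySem.Chars.join_cons_cons]
          simp [List.append_assoc]

-- one appended candidate, at the String level: A's per-element formatting equals B's join
lemma pvKey (t : List Int) (C : Int) :
    (if pvJoin t == "" then PySem.Int.toStr C else pvJoin t ++ ":" ++ PySem.Int.toStr C)
      = pvJoin (t ++ [C]) := by
  cases t with
  | nil =>
      have h0 : pvJoin [] = "" := rfl
      simp only [h0]
      apply String.toList_inj.mp
      simp [pvJoin, PySem.Str.toList_join, PySem.Chars.join_singleton, PySem.Int.toList_toStr]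
  | cons x xs =>
      have hne : pvJoin (x :: xs) ≠ "" := by
        intro h
        have := congrArg String.toList h
        rw [pvJoin, PySem.Str.toList_join] at this
        simp only [List.map_cons, List.map_map] at this
        exact pvJoin_cons_ne_nil _ x _ (by simpa [PySem.Int.toList_toStr] using this)
      have hb : (pvJoin (x :: xs) == "") = false := by
        simpa using hne
      simp only [hb, Bool.false_eq_true, if_false]
      apply String.toList_inj.mp
      rw [String.toList_append, String.toList_append]
      rw [pvJoin, pvJoin, PySem.Str.toList_join, PySem.Str.toList_join]
      rw [List.map_append, List.map_append]
      simp only [List.map_cons, List.map_nil]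
      rw [pvChars_join_append_singleton ":".toList (PySem.Int.toStr C).toList
            (String.toList (PySem.Int.toStr x) :: List.map String.toList (List.map PySem.Int.toStr xs))
            (by simp)]

-- one pass of A's loop body on a list of joined tuples appends one coordinate to every tuple
lemma pvStep (candidates : List Int) (tp : List (List Int)) :
    (tp.map pvJoin).foldl
        (fun new_nets net =>
          candidates.foldl
            (fun acc C =>
              acc ++ [if net == "" then PySem.Int.toStr C else net ++ ":" ++ PySem.Int.toStr C])
            new_nets) []
      = (tp.flatMap (fun p => candidates.map (fun c => p ++ [c]))).map pvJoin := by
  have hbody : ∀ (init : List String) (net : String),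
      candidates.foldl
        (fun acc C =>
          acc ++ [if net == "" then PySem.Int.toStr C else net ++ ":" ++ PySem.Int.toStr C]) init
      = init ++ candidates.map
          (fun C => if net == "" then PySem.Int.toStr C else net ++ ":" ++ PySem.Int.toStr C) := by
    intro init net
    exact PySem.List.foldl_append_singleton_eq_map ..
  calc (tp.map pvJoin).foldl
          (fun new_nets net =>
            candidates.foldl
              (fun acc C =>
                acc ++ [if net == "" then PySem.Int.toStr C else net ++ ":" ++ PySem.Int.toStr C])
              new_nets) []
      = (tp.map pvJoin).foldl
          (fun new_nets net =>
            new_nets ++ candidates.map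
              (fun C => if net == "" then PySem.Int.toStr C else net ++ ":" ++ PySem.Int.toStr C)) [] := by
        exact PySem.List.foldl_congr_mem _ _ _ _ (fun acc net _ => hbody acc net)
    _ = [] ++ (tp.map pvJoin).flatMap
          (fun net => candidates.map
            (fun C => if net == "" then PySem.Int.toStr C else net ++ ":" ++ PySem.Int.toStr C)) := by
        exact PySem.List.foldl_append_eq_flatMap ..
    _ = (tp.flatMap (fun p => candidates.map (fun c => p ++ [c]))).map pvJoin := by
        rw [List.nil_append, List.flatMap_map, List.map_flatMap]
        apply List.flatMap_congr
        intro p _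
        rw [List.map_map]
        exact List.map_congr_left (fun C _ => pvKey p C)

-- iterating A's pass n times from [''] yields the joined length-n tuples
lemma pvIter (candidates : List Int) : ∀ n : Nat,
    (fun nets =>
      nets.foldl
        (fun new_nets net =>
          candidates.foldl
            (fun acc C =>
              acc ++ [if net == "" then PySem.Int.toStr C else net ++ ":" ++ PySem.Int.toStr C])
            new_nets) [])^[n] [""]
      = (pvTuples candidates n).map pvJoin := by
  intro n
  induction n with
  | zero => rfl
  | succ n ih =>
      rw [Function.iterate_succ_apply', ih, pvStep]
      rfl

-- ===== VERDICT (by name: the statement is the Claim_ definition above) =====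
theorem traverse_net_spec : Claim_equal_traverse_net := by
  intro candidates N _
  unfold Spec_traverse_net traverse_net traverse_net_alt
  rw [List.foldl_const]
  have hlen : (PySem.List.pyRange 0 N 1).length = N.toNat := by simp [pysem]
  rw [hlen, pvIter]
  rfl
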